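-- pv_equiv track=rewrite | github.com/7meis/vscode-saltstack | scripts/export_state_hover_docs.py | _normalize_docstring
-- ===== SOURCE A (Python) =====
-- def _normalize_docstring(docstring):
--     if not docstring:
--         return ''
--
--     lines = str(docstring).replace('\r\n', '\n').strip().split('\n')
--     normalized = []
--     blank_line = False
--     for line in lines:
--         stripped = line.rstrip()
--         if not stripped:
--             if normalized and not blank_line:
--                 normalized.append('')
--             blank_line = True
--             continue
--         normalized.append(stripped)
--         blank_line = False
--     return '\n'.join(normalized).strip()
-- ===== SOURCE B (Python) =====
-- def _normalize_docstring(docstring):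
--     if not docstring:
--         return ''
--     text = str(docstring).replace('\r\n', '\n').strip()
--     paras = []
--     nxt = None  # the (rstripped) line that follows the current one
--     for line in reversed(text.split('\n')):
--         head = line.rstrip()
--         if head:
--             if paras and nxt:
--                 paras[0] = head + '\n' + paras[0]
--             else:
--                 paras.insert(0, head)
--         nxt = head
--     return '\n\n'.join(paras).strip()
-- ===== Notes on version B (the rewrite author's own statement) =====
-- stated objective: alternative
-- what changed: A's left-to-right loop with a blank_line flag that inserts at most one empty separator line is replaced by a right fold that assembles whole paragraphs (merging a line into the following paragraph when the next line is nonblank) and joins them with a double newline.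
import Mathlib
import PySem

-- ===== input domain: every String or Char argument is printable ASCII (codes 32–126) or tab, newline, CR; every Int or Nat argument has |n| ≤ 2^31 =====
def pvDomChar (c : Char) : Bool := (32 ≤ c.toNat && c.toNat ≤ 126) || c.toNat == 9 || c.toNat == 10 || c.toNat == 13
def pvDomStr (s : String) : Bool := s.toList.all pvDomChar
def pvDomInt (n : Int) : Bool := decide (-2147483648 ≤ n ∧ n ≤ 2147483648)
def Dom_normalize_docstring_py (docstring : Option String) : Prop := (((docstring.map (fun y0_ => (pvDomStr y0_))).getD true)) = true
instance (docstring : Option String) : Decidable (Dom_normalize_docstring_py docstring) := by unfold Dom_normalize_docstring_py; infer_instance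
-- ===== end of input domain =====

-- B replaces A's left-to-right fold with a stateful blank_line flag by a right fold that
-- assembles whole paragraphs and joins them with a double newline (objective: alternative).

-- ===== PORT A =====
-- loop body of A: stripped = line.rstrip(); blank lines set the flag and append at most one '';
-- state = (normalized, blank_line)
def pvStepA (st : List (List Char) × Bool) (line : List Char) : List (List Char) × Bool :=
  let stripped := PySem.Chars.rstrip line
  if stripped = [] then
    (if st.1 ≠ [] ∧ st.2 = false then st.1 ++ [[]] else st.1, true)
  else
    (st.1 ++ [stripped], false)

def normalize_docstring_py (docstring : Option String) : String :=
  match docstring with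
  | none => ""
  | some s =>
    if s = "" then ""
    else
      let lines := PySem.Chars.splitOn (PySem.Chars.strip (PySem.Chars.replace s.toList ['\r', '\n'] ['\n'])) ['\n']
      let res := lines.foldl pvStepA ([], false)
      String.ofList (PySem.Chars.strip (PySem.Chars.join ['\n'] res.1))

-- ===== PORT B =====
-- loop body of B (the reversed-iteration loop, i.e. a right fold): state = (paras, nxt);
-- a nonblank line is prepended into the first paragraph when the following line was nonblank,
-- otherwise it opens a new paragraph; 'paras.insert(0, …)' / 'paras[0] = …' are the cons/replace below
def pvStepB (line : List Char) (st : List (List Char) × Option (List Char)) :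
    List (List Char) × Option (List Char) :=
  let head := PySem.Chars.rstrip line
  let nxtTruthy : Bool := match st.2 with | some n => n ≠ [] | none => false
  (if head ≠ [] then
     match st.1 with
     | p :: ps => if nxtTruthy then (head ++ '\n' :: p) :: ps else head :: p :: ps
     | [] => [head]
   else st.1, some head)

def normalize_docstring_py_alt (docstring : Option String) : String :=
  match docstring with
  | none => ""
  | some s =>
    if s = "" then ""
    else
      let text := PySem.Chars.strip (PySem.Chars.replace s.toList ['\r', '\n'] ['\n'])
      let res := (PySem.Chars.splitOn text ['\n']).foldr pvStepB ([], none)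
      String.ofList (PySem.Chars.strip (PySem.Chars.join ['\n', '\n'] res.1))

-- ===== PRECONDITION & SPEC =====
def Spec_normalize_docstring_py (docstring : Option String) (out : String) : Prop := out = normalize_docstring_py_alt docstring
instance (docstring : Option String) (out : String) : Decidable (Spec_normalize_docstring_py docstring out) := by unfold Spec_normalize_docstring_py; infer_instance

-- ===== CLAIM (what is proved, stated in full; the proofs are below) =====
def Claim_equal_normalize_docstring_py : Prop := ∀ (docstring : Option String), Dom_normalize_docstring_py docstring → Spec_normalize_docstring_py docstring (normalize_docstring_py docstring)

-- ===== LEMMAS AND PROOFS =====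

-- A's loop body after the rstrip has been pulled out (pvStepA st line = pvStepA' st (rstrip line))
def pvStepA' (st : List (List Char) × Bool) (m : List Char) : List (List Char) × Bool :=
  if m = [] then
    (if st.1 ≠ [] ∧ st.2 = false then st.1 ++ [[]] else st.1, true)
  else
    (st.1 ++ [m], false)

-- B's loop body after the rstrip has been pulled out
def pvStepB' (m : List Char) (st : List (List Char) × Option (List Char)) :
    List (List Char) × Option (List Char) :=
  let nxtTruthy : Bool := match st.2 with | some n => n ≠ [] | none => false
  (if m ≠ [] then
     match st.1 with
     | p :: ps => if nxtTruthy then (m ++ '\n' :: p) :: ps else m :: p :: ps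
     | [] => [m]
   else st.1, some m)

-- what A's fold appends after the first nonblank line, given the current blank flag
def pvRest : Bool → List (List Char) → List (List Char)
  | _, [] => []
  | b, m :: t => if m = [] then (if b then pvRest true t else [] :: pvRest true t) else m :: pvRest false t

-- A's normalized list: leading blanks dropped, then pvRest with the flag down
def pvCol : List (List Char) → List (List Char)
  | [] => []
  | m :: t => if m = [] then pvCol t else m :: pvRest false t

-- B's paragraph list
def pvQ (ms : List (List Char)) : List (List Char) := (ms.foldr pvStepB' ([], none)).1

theorem pvRest_true_eq (ms : List (List Char)) : pvRest true ms = pvCol ms := by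
  induction ms with
  | nil => rfl
  | cons m t ih =>
    by_cases hm : m = [] <;> simp [pvRest, pvCol, hm, ih]

theorem pvFold_acc (ms : List (List Char)) :
    ∀ (acc : List (List Char)) (b : Bool), acc ≠ [] →
      (ms.foldl pvStepA' (acc, b)).1 = acc ++ pvRest b ms := by
  induction ms with
  | nil => intro acc b _; simp [pvRest]
  | cons m t ih =>
    intro acc b hacc
    by_cases hm : m = []
    · subst hm
      have h1 : pvStepA' (acc, b) [] = (if acc ≠ [] ∧ b = false then acc ++ [[]] else acc, true) := rfl
      cases b with
      | false =>
        rw [List.foldl_cons, h1, if_pos ⟨hacc, rfl⟩, ih _ true (by simp)]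
        simp [pvRest]
      | true =>
        rw [List.foldl_cons, h1, if_neg (by simp), ih _ true hacc]
        simp [pvRest]
    · have h1 : pvStepA' (acc, b) m = (acc ++ [m], false) := by simp [pvStepA', hm]
      rw [List.foldl_cons, h1, ih _ false (by simp)]
      simp [pvRest, hm]

theorem pvFold_nil (ms : List (List Char)) :
    ∀ (b : Bool), (ms.foldl pvStepA' (([] : List (List Char)), b)).1 = pvCol ms := by
  induction ms with
  | nil => intro b; rfl
  | cons m t ih =>
    intro b
    by_cases hm : m = []
    · subst hm
      have h1 : pvStepA' (([] : List (List Char)), b) [] = ([], true) := by simp [pvStepA']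
      rw [List.foldl_cons, h1, ih true]
      simp [pvCol]
    · have h1 : pvStepA' (([] : List (List Char)), b) m = ([m], false) := by simp [pvStepA', hm]
      rw [List.foldl_cons, h1, pvFold_acc t [m] false (by simp)]
      simp [pvCol, hm]

theorem pvQ_snd (ms : List (List Char)) : (ms.foldr pvStepB' ([], none)).2 = ms.head? := by
  cases ms with
  | nil => rfl
  | cons m t => simp [List.foldr_cons, pvStepB']

theorem pvQ_blank_cons (t : List (List Char)) : pvQ ([] :: t) = pvQ t := by
  unfold pvQ; rw [List.foldr_cons]; simp [pvStepB']

theorem pvQ_cons_ne_nil (m : List Char) (t : List (List Char)) (hm : m ≠ []) :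
    pvQ (m :: t) ≠ [] := by
  unfold pvQ; rw [List.foldr_cons]
  cases hq : (t.foldr pvStepB' ([], none)).1 with
  | nil => simp [pvStepB', hm, hq]
  | cons p ps => simp [pvStepB', hm, hq]; split <;> (try split) <;> simp

theorem pvQ_cons_of_not_merge (m : List Char) (t : List (List Char)) (hm : m ≠ [])
    (ht : (match t.head? with | some n => n ≠ [] | none => false) = false) :
    pvQ (m :: t) = m :: pvQ t := by
  unfold pvQ; rw [List.foldr_cons]
  have h2 := pvQ_snd t
  cases hh : t.head? with
  | none =>
    cases hq : (t.foldr pvStepB' ([], none)).1 with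
    | nil => simp [pvStepB', hm, hq]
    | cons p ps => simp [pvStepB', hm, h2, hh, hq]
  | some n =>
    rw [hh] at ht; simp at ht
    cases hq : (t.foldr pvStepB' ([], none)).1 with
    | nil => simp [pvStepB', hm, hq]
    | cons p ps => simp [pvStepB', hm, h2, hh, hq, ht]

theorem pvQ_cons_merge (m r : List Char) (t' : List (List Char)) (hm : m ≠ []) (hr : r ≠ []) :
    ∃ p ps, pvQ (r :: t') = p :: ps ∧ pvQ (m :: r :: t') = (m ++ '\n' :: p) :: ps := by
  obtain ⟨p, ps, hq⟩ : ∃ p ps, pvQ (r :: t') = p :: ps := by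
    cases hq : pvQ (r :: t') with
    | nil => exact absurd hq (pvQ_cons_ne_nil r t' hr)
    | cons p ps => exact ⟨p, ps, rfl⟩
  refine ⟨p, ps, hq, ?_⟩
  show (pvStepB' m ((r :: t').foldr pvStepB' ([], none))).1 = _
  have h2' : ((r :: t').foldr pvStepB' ([], none)).2 = some r := by rw [pvQ_snd]; rfl
  have hq' : ((r :: t').foldr pvStepB' ([], none)).1 = p :: ps := hq
  simp only [pvStepB', hq', h2']
  simp [hm, hr]

theorem pvCol_eq_nil_iff (ms : List (List Char)) : pvCol ms = [] ↔ ∀ x ∈ ms, x = [] := by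
  induction ms with
  | nil => simp [pvCol]
  | cons m t ih =>
    by_cases hm : m = [] <;> simp [pvCol, hm, ih]

theorem pvQ_eq_nil_iff (ms : List (List Char)) : pvQ ms = [] ↔ ∀ x ∈ ms, x = [] := by
  induction ms with
  | nil => simp [pvQ]
  | cons m t ih =>
    by_cases hm : m = []
    · subst hm; simp [pvQ_blank_cons, ih]
    · simp [pvQ_cons_ne_nil m t hm, hm]

-- join helpers
theorem pv_join_cons (sep : List Char) (x : List Char) (X : List (List Char)) (hX : X ≠ []) :
    PySem.Chars.join sep (x :: X) = x ++ sep ++ PySem.Chars.join sep X := by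
  cases X with
  | nil => exact absurd rfl hX
  | cons y ys => exact PySem.Chars.join_cons_cons sep x y ys

-- the two joined strings agree up to one trailing newline
theorem pvMain : ∀ (n : Nat) (ms : List (List Char)), ms.length ≤ n →
    PySem.Chars.join ['\n'] (pvCol ms) = PySem.Chars.join ['\n', '\n'] (pvQ ms) ∨
    PySem.Chars.join ['\n'] (pvCol ms) = PySem.Chars.join ['\n', '\n'] (pvQ ms) ++ ['\n'] := by
  intro n
  induction n with
  | zero =>
    intro ms hlen
    have : ms = [] := List.length_eq_zero_iff.mp (Nat.le_zero.mp hlen)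
    subst this; left; rfl
  | succ n ih =>
    intro ms hlen
    match ms with
    | [] => left; rfl
    | m :: t =>
      by_cases hm : m = []
      · subst hm
        have h1 : pvCol ([] :: t) = pvCol t := by simp [pvCol]
        rw [h1, pvQ_blank_cons]
        exact ih t (by simpa using Nat.le_of_succ_le_succ hlen)
      · cases t with
        | nil =>
          left
          have h1 : pvCol [m] = [m] := by simp [pvCol, pvRest, hm]
          have h2 : pvQ [m] = [m] := by
            rw [pvQ_cons_of_not_merge m [] hm (by rfl)]; rfl
          rw [h1, h2, PySem.Chars.join_singleton, PySem.Chars.join_singleton]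
        | cons r t' =>
          by_cases hr : r = []
          · subst hr
            have h1 : pvCol (m :: [] :: t') = m :: [] :: pvCol t' := by
              simp [pvCol, pvRest, hm, pvRest_true_eq]
            have h2 : pvQ (m :: [] :: t') = m :: pvQ t' := by
              rw [pvQ_cons_of_not_merge m ([] :: t') hm (by simp), pvQ_blank_cons]
            rw [h1, h2]
            by_cases hnil : pvCol t' = []
            · right
              have hq : pvQ t' = [] := (pvQ_eq_nil_iff t').mpr ((pvCol_eq_nil_iff t').mp hnil)
              rw [hnil, hq, PySem.Chars.join_cons_cons, PySem.Chars.join_singleton,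
                PySem.Chars.join_singleton]
              simp
            · have hq : pvQ t' ≠ [] := fun h =>
                hnil ((pvCol_eq_nil_iff t').mpr ((pvQ_eq_nil_iff t').mp h))
              rw [PySem.Chars.join_cons_cons, pv_join_cons _ _ _ hnil,
                pv_join_cons _ _ _ hq]
              rcases ih t' (by simp at hlen; omega) with h | h
              · left; rw [h]; simp
              · right; rw [h]; simp
          · -- the following line is nonblank: A continues the paragraph, B merges into it
            have h1 : pvCol (m :: r :: t') = m :: pvCol (r :: t') := by
              simp [pvCol, pvRest, hm, hr]
            obtain ⟨p, ps, hqrt, hqm⟩ := pvQ_cons_merge m r t' hm hr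
            have hcolne : pvCol (r :: t') ≠ [] := by
              simp [pvCol, hr]
            have hJ2 : PySem.Chars.join ['\n', '\n'] (pvQ (m :: r :: t')) =
                m ++ '\n' :: PySem.Chars.join ['\n', '\n'] (pvQ (r :: t')) := by
              rw [hqm, hqrt]
              cases ps with
              | nil => simp [PySem.Chars.join_singleton]
              | cons q qs =>
                rw [PySem.Chars.join_cons_cons, PySem.Chars.join_cons_cons]
                simp
            rw [h1, pv_join_cons _ _ _ hcolne, hJ2]
            rcases ih (r :: t') (by simpa using Nat.le_of_succ_le_succ hlen) with h | h
            · left; rw [h]; simp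
            · right; rw [h]; simp

theorem pv_rstrip_append_nl (z : List Char) :
    PySem.Chars.rstrip (z ++ ['\n']) = PySem.Chars.rstrip z := by
  simp [PySem.Chars.rstrip, List.dropWhile]
  rfl

theorem pv_strip_append_nl (x : List Char) :
    PySem.Chars.strip (x ++ ['\n']) = PySem.Chars.strip x := by
  show PySem.Chars.rstrip (PySem.Chars.lstrip (x ++ ['\n'])) =
    PySem.Chars.rstrip (PySem.Chars.lstrip x)
  unfold PySem.Chars.lstrip
  rw [List.dropWhile_append]
  by_cases h : (List.dropWhile PySem.Chars.isspace x).isEmpty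
  · rw [if_pos h, List.isEmpty_iff.mp h]
    rfl
  · rw [if_neg (by simp [h])]
    exact pv_rstrip_append_nl _

-- ===== VERDICT (by name: the statement is the Claim_ definition above) =====
theorem normalize_docstring_py_spec : Claim_equal_normalize_docstring_py := by
  intro docstring _
  unfold Spec_normalize_docstring_py
  cases docstring with
  | none => rfl
  | some s =>
    by_cases hs : s = ""
    · simp [normalize_docstring_py, normalize_docstring_py_alt, hs]
    · simp only [normalize_docstring_py, normalize_docstring_py_alt, if_neg hs]
      have hA : ∀ lines : List (List Char),
          lines.foldl pvStepA (([] : List (List Char)), false) =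
            (lines.map PySem.Chars.rstrip).foldl pvStepA' ([], false) := by
        intro lines; rw [List.foldl_map]; rfl
      have hB : ∀ lines : List (List Char),
          lines.foldr pvStepB (([] : List (List Char)), (none : Option (List Char))) =
            (lines.map PySem.Chars.rstrip).foldr pvStepB' ([], none) := by
        intro lines; rw [List.foldr_map]; rfl
      set lines := PySem.Chars.splitOn
        (PySem.Chars.strip (PySem.Chars.replace s.toList ['\r', '\n'] ['\n'])) ['\n'] with hl
      rw [hA lines, hB lines, pvFold_nil]
      have := pvMain (lines.map PySem.Chars.rstrip).length (lines.map PySem.Chars.rstrip) le_rfl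
      rcases this with h | h
      · rw [show ((lines.map PySem.Chars.rstrip).foldr pvStepB' ([], none)).1 =
            pvQ (lines.map PySem.Chars.rstrip) from rfl, h]
      · rw [show ((lines.map PySem.Chars.rstrip).foldr pvStepB' ([], none)).1 =
            pvQ (lines.map PySem.Chars.rstrip) from rfl, h, pv_strip_append_nl]
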